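-- pv_equiv track=rewrite | github.com/Tehlikeli107/counting-revolution | tournament_hard_pairs.py | canonical_tournament
-- ===== SOURCE A (Python) =====
-- from itertools import combinations, permutations
--
-- def canonical_tournament(A, n):
--     pairs = [(i,j) for i in range(n) for j in range(i+1,n)]
--     pair_idx = {p: i for i,p in enumerate(pairs)}
--     bits0 = 0
--     for idx,(i,j) in enumerate(pairs):
--         if A[j,i]:
--             bits0 |= (1 << idx)
--     min_bits = bits0
--     for perm in permutations(range(n)):
--         new_bits = 0
--         for idx,(i,j) in enumerate(pairs):
--             pi,pj = perm[i],perm[j]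
--             if pi < pj:
--                 dst = pair_idx[(pi,pj)]
--                 if A[j,i]:
--                     new_bits |= (1 << dst)
--             else:
--                 dst = pair_idx[(pj,pi)]
--                 if A[i,j]:
--                     new_bits |= (1 << dst)
--         min_bits = min(min_bits, new_bits)
--     return min_bits
-- ===== SOURCE B (Python) =====
-- def canonical_tournament(A, n):
--     # Recursive backtracking: assign new labels 0..n-1 one vertex at a time,
--     # accumulating the encoding bits incrementally with a closed-form pair index
--     # (no pairs list, no pair_idx dict, no itertools.permutations).
--     def idx(a, b):  # position of pair (a, b), a < b, in row-major pair order
--         return a * (2 * n - a - 1) // 2 + (b - a - 1)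
--
--     best = None
--
--     def place(assigned, remaining, bits):
--         nonlocal best
--         if not remaining:
--             if best is None or bits < best:
--                 best = bits
--             return
--         k = len(assigned)
--         for t, u in enumerate(remaining):
--             nb = bits
--             for a, w in enumerate(assigned):
--                 if A[u, w]:
--                     nb |= 1 << idx(a, k)
--             place(assigned + [u], remaining[:t] + remaining[t + 1:], nb)
--
--     place([], list(range(n)), 0)
--     return best
-- ===== Notes on version B (the rewrite author's own statement) =====
-- stated objective: alternative
-- what changed: B discards A's itertools.permutations enumeration, materialized pairs list and pair_idx dictionary entirely: it runs a recursive backtracking search that assigns new labels 0..n-1 one vertex at a time, accumulating the encoding bits incrementally as each vertex is placed (using a closed-form triangular pair index) and folding the minimum at the leaves of the search tree.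
import Mathlib
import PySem

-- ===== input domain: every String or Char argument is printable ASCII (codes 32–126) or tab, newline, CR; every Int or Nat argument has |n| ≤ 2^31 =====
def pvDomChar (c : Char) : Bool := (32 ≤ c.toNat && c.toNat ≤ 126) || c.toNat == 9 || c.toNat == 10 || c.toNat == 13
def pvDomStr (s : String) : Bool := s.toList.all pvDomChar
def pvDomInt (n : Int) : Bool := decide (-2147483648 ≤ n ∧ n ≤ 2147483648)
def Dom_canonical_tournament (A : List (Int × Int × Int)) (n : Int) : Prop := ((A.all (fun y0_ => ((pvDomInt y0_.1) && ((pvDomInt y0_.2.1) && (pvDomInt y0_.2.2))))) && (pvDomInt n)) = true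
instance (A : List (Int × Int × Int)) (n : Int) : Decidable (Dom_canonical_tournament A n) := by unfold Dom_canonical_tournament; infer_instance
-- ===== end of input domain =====

-- B replaces A's itertools.permutations enumeration with pairs list and pair_idx dict by a
-- recursive backtracking search that assigns new labels one vertex at a time, accumulating the
-- encoding bits incrementally with a closed-form triangular pair index; objective: alternative.

-- ===== PORT A =====
-- shared helper: Python's dict access A[(j, i)] on the dict argument (flattened triples (j, i, v))
def pvLookup (A : List (Int × Int × Int)) (j i : Int) : Option Int :=
  (A.find? (fun e => e.1 == j && e.2.1 == i)).map (fun e => e.2.2)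

-- A's pairs comprehension [(i,j) for i in range(n) for j in range(i+1,n)]
def pvPairs (n : Int) : List (Int × Int) :=
  (PySem.List.pyRange 0 n 1).flatMap (fun i => (PySem.List.pyRange (i+1) n 1).map (fun j => (i, j)))

-- the bitmask accumulators are kept as Nat (the Python value is a nonnegative int built with | and <<);
-- the result is cast to Int at the end
def canonical_tournament (A : List (Int × Int × Int)) (n : Int) : Int :=
  let pairs := pvPairs n
  let pair_idx : PySem.Dict (Int × Int) Int :=
    (PySem.List.enumerate pairs 0).foldl (fun d e => d.insert e.2 e.1) PySem.Dict.empty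
  let bits0 : Nat :=
    (PySem.List.enumerate pairs 0).foldl
      (fun s e => if (pvLookup A e.2.2 e.2.1).getD 0 ≠ 0 then s ||| (1 <<< e.1.toNat) else s) 0
  let perms := PySem.List.permutations (PySem.List.pyRange 0 n 1) (PySem.List.pyRange 0 n 1).length
  let min_bits : Nat :=
    perms.foldl (fun m perm =>
      let new_bits : Nat :=
        (PySem.List.enumerate pairs 0).foldl (fun s e =>
          let i := e.2.1
          let j := e.2.2
          let pi := PySem.List.pyGetD perm i 0
          let pj := PySem.List.pyGetD perm j 0
          if pi < pj then
            (if (pvLookup A j i).getD 0 ≠ 0 then s ||| (1 <<< ((pair_idx.get? (pi, pj)).getD 0).toNat) else s)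
          else
            (if (pvLookup A i j).getD 0 ≠ 0 then s ||| (1 <<< ((pair_idx.get? (pj, pi)).getD 0).toNat) else s)) 0
      min m new_bits) bits0
  (min_bits : Int)

-- ===== PORT B =====
-- Source B's idx(a, b): row-major position of the pair (a, b), a < b
def pvIdx (n a b : Int) : Int :=
  PySem.Int.floordiv (a * (2 * n - a - 1)) 2 + (b - a - 1)

-- Source B's recursive place(assigned, remaining, bits); best is threaded as an Option Nat
-- accumulator; the fuel argument only makes the recursion structural (it starts at
-- remaining.length and each call removes one element, so it is never exhausted)
def pvPlace (A : List (Int × Int × Int)) (n : Int) :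
    Nat → List Int → List Int → Nat → Option Nat → Option Nat
  | _, _, [], bits, best =>
      (match best with
       | none => some bits
       | some m => if bits < m then some bits else some m)
  | 0, _, _ :: _, _, best => best
  | fuel + 1, assigned, r :: rs, bits, best =>
      (PySem.List.enumerate (r :: rs) 0).foldl
        (fun best tu =>
          let nb := (PySem.List.enumerate assigned 0).foldl
            (fun s aw =>
              if (pvLookup A tu.2 aw.2).getD 0 ≠ 0
              then s ||| (1 <<< (pvIdx n aw.1 (assigned.length : Int)).toNat)
              else s) bits
          pvPlace A n fuel (assigned ++ [tu.2])
            (PySem.List.slice (r :: rs) none (some tu.1) ++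
             PySem.List.slice (r :: rs) (some (tu.1 + 1)) none)
            nb best)
        best

def canonical_tournament_alt (A : List (Int × Int × Int)) (n : Int) : Int :=
  let start := PySem.List.pyRange 0 n 1
  (((pvPlace A n start.length [] start 0 none).getD 0 : Nat) : Int)
  -- the getD default is unreachable: the recursion always reaches the base case, so best is set

-- ===== PRECONDITION & SPEC =====
-- Pre_ excludes exactly the inputs where Python A raises KeyError: some pair key (j,i) or (i,j)
-- with 0 ≤ i < j < n missing from the dict A.
def Pre_canonical_tournament (A : List (Int × Int × Int)) (n : Int) : Prop :=
  n ≤ 1 ∨ (((PySem.List.dedup (A.map (fun e => (e.1, e.2.1)))).filter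
      (fun k => decide (0 ≤ k.1 ∧ k.1 < n ∧ 0 ≤ k.2 ∧ k.2 < n ∧ k.1 ≠ k.2))).length : Int) = n * (n - 1)
instance (A : List (Int × Int × Int)) (n : Int) : Decidable (Pre_canonical_tournament A n) := by
  unfold Pre_canonical_tournament; infer_instance

def pvWitness_canonical_tournament : (List (Int × Int × Int)) × Int := ([(0, 1, 1), (1, 0, 0)], 2)

def Spec_canonical_tournament (A : List (Int × Int × Int)) (n : Int) (out : Int) : Prop := out = canonical_tournament_alt A n
instance (A : List (Int × Int × Int)) (n : Int) (out : Int) : Decidable (Spec_canonical_tournament A n out) := by unfold Spec_canonical_tournament; infer_instance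

-- ===== CLAIM (what is proved, stated in full; the proofs are below) =====
def Claim_equal_canonical_tournament : Prop := ∀ (A : List (Int × Int × Int)) (n : Int), Dom_canonical_tournament A n → Pre_canonical_tournament A n → Spec_canonical_tournament A n (canonical_tournament A n)

-- ===== LEMMAS AND PROOFS =====

-- proof-local names for the inner computations of the two ports
def pvPairIdx (n : Int) : PySem.Dict (Int × Int) Int :=
  (PySem.List.enumerate (pvPairs n) 0).foldl (fun d e => d.insert e.2 e.1) PySem.Dict.empty

def pvBits0 (A : List (Int × Int × Int)) (n : Int) : Nat :=
  (PySem.List.enumerate (pvPairs n) 0).foldl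
    (fun s e => if (pvLookup A e.2.2 e.2.1).getD 0 ≠ 0 then s ||| (1 <<< e.1.toNat) else s) 0

def pvAbits (A : List (Int × Int × Int)) (n : Int) (perm : List Int) : Nat :=
  (PySem.List.enumerate (pvPairs n) 0).foldl (fun s e =>
    let i := e.2.1
    let j := e.2.2
    let pi := PySem.List.pyGetD perm i 0
    let pj := PySem.List.pyGetD perm j 0
    if pi < pj then
      (if (pvLookup A j i).getD 0 ≠ 0 then s ||| (1 <<< (((pvPairIdx n).get? (pi, pj)).getD 0).toNat) else s)
    else
      (if (pvLookup A i j).getD 0 ≠ 0 then s ||| (1 <<< (((pvPairIdx n).get? (pj, pi)).getD 0).toNat) else s)) 0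

-- the inverse permutation inv (inv[p[k]] = k), used only in the proofs to relate the two sides
def pvInv (n : Int) (perm : List Int) : List Int :=
  (PySem.List.enumerate perm 0).foldl (fun l kv => PySem.List.pySetD l kv.2 kv.1) (List.replicate n.toNat 0)

-- the encoding of the relabelled tournament read off a given inverse permutation q
def pvQbits (A : List (Int × Int × Int)) (n : Int) (q : List Int) : Nat :=
  (PySem.List.enumerate (pvPairs n) 0).foldl (fun s e =>
    if (pvLookup A (PySem.List.pyGetD q e.2.2 0) (PySem.List.pyGetD q e.2.1 0)).getD 0 ≠ 0
    then s ||| (1 <<< e.1.toNat) else s) 0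

def pvPerms (n : Int) : List (List Int) :=
  PySem.List.permutations (PySem.List.pyRange 0 n 1) (PySem.List.pyRange 0 n 1).length

-- the branch condition and destination slot of A's inner loop, and the q-indexed condition
def pvCA (A : List (Int × Int × Int)) (p : List Int) (e : Int × Int × Int) : Bool :=
  if PySem.List.pyGetD p e.2.1 0 < PySem.List.pyGetD p e.2.2 0
  then ((pvLookup A e.2.2 e.2.1).getD 0 != 0)
  else ((pvLookup A e.2.1 e.2.2).getD 0 != 0)

def pvDA (n : Int) (p : List Int) (e : Int × Int × Int) : Nat :=
  if PySem.List.pyGetD p e.2.1 0 < PySem.List.pyGetD p e.2.2 0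
  then (((pvPairIdx n).get? (PySem.List.pyGetD p e.2.1 0, PySem.List.pyGetD p e.2.2 0)).getD 0).toNat
  else (((pvPairIdx n).get? (PySem.List.pyGetD p e.2.2 0, PySem.List.pyGetD p e.2.1 0)).getD 0).toNat

def pvCB (A : List (Int × Int × Int)) (n : Int) (p : List Int) (e : Int × Int × Int) : Bool :=
  ((pvLookup A (PySem.List.pyGetD (pvInv n p) e.2.2 0) (PySem.List.pyGetD (pvInv n p) e.2.1 0)).getD 0 != 0)

-- B-side proof-local names
def pvOptMin (b : Option Nat) (v : Nat) : Option Nat :=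
  match b with
  | none => some v
  | some m => if v < m then some v else some m

def pvRow (A : List (Int × Int × Int)) (n : Int) (assigned : List Int) (bits : Nat) (u : Int) : Nat :=
  (PySem.List.enumerate assigned 0).foldl
    (fun s aw =>
      if (pvLookup A u aw.2).getD 0 ≠ 0
      then s ||| (1 <<< (pvIdx n aw.1 (assigned.length : Int)).toNat)
      else s) bits

def pvFinish (A : List (Int × Int × Int)) (n : Int) : List Int → List Int → Nat → Nat
  | _, [], bits => bits
  | assigned, u :: q, bits => pvFinish A n (assigned ++ [u]) q (pvRow A n assigned bits u)

def pvCondQ (A : List (Int × Int × Int)) (q : List Int) (a b : Int) : Bool :=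
  ((pvLookup A (PySem.List.pyGetD q b 0) (PySem.List.pyGetD q a 0)).getD 0 != 0)

def pvPairsFrom (k0 len : Nat) : List (Nat × Nat) :=
  (List.range' k0 (len - k0)).flatMap (fun k => (List.range k).map (fun a => (a, k)))

def pvOrQ (A : List (Int × Int × Int)) (n : Int) (q : List Int) (L : List (Nat × Nat)) (s : Nat) : Nat :=
  L.foldl (fun b p => if pvCondQ A q (p.1 : Int) (p.2 : Int)
                      then b ||| (1 <<< (pvIdx n (p.1 : Int) (p.2 : Int)).toNat) else b) s

-- pairs characterization
lemma mem_pvPairs {n a b : Int} : (a, b) ∈ pvPairs n ↔ 0 ≤ a ∧ a < b ∧ b < n := by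
  simp [pvPairs, PySem.List.mem_pyRange_one]; omega

lemma pvPairs_nodup (n : Int) : (pvPairs n).Nodup := by
  rw [pvPairs, List.nodup_flatMap]
  refine ⟨fun i _ => ?_, ?_⟩
  · exact (PySem.List.nodup_pyRange_one _ _).map (fun x y h => by simpa using h)
  · apply List.Pairwise.imp (R := (· ≠ ·))
    · intro i j hne p hp hq
      simp only [List.mem_map] at hp hq
      obtain ⟨a, _, rfl⟩ := hp
      obtain ⟨b, _, h⟩ := hq
      exact hne (congrArg Prod.fst h).symm
    · exact (PySem.List.nodup_pyRange_one 0 n)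

-- dict built by fold-insert over enumerate, keys nodup
lemma get?_foldl_insert_not_mem (L : List (Int × (Int × Int))) (d : PySem.Dict (Int × Int) Int)
    (p : Int × Int) (h : p ∉ L.map (·.2)) :
    (L.foldl (fun d e => d.insert e.2 e.1) d).get? p = d.get? p := by
  induction L generalizing d with
  | nil => rfl
  | cons e L ih =>
    simp only [List.map_cons, List.mem_cons, not_or] at h
    simp only [List.foldl_cons]
    rw [ih _ h.2, PySem.Dict.get?_insert_of_ne _ _ h.1]

lemma get?_foldl_insert_mem (L : List (Int × (Int × Int))) (d : PySem.Dict (Int × Int) Int)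
    (k : Int) (p : Int × Int) (hnd : (L.map (·.2)).Nodup) (h : (k, p) ∈ L) :
    (L.foldl (fun d e => d.insert e.2 e.1) d).get? p = some k := by
  induction L generalizing d with
  | nil => simp at h
  | cons e L ih =>
    simp only [List.map_cons, List.nodup_cons] at hnd
    simp only [List.foldl_cons]
    rcases List.mem_cons.mp h with rfl | h
    · rw [get?_foldl_insert_not_mem _ _ _ hnd.1, PySem.Dict.get?_insert_self]
    · exact ih _ hnd.2 h

lemma pvPairIdx_get (n : Int) (t : Nat) (ht : t < (pvPairs n).length) :
    (pvPairIdx n).get? (pvPairs n)[t] = some (t : Int) := by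
  apply get?_foldl_insert_mem
  · rw [PySem.List.map_snd_enumerate]; exact pvPairs_nodup n
  · rw [PySem.List.mem_enumerate_iff]
    exact ⟨t, ht, by simp⟩

-- the triangular closed-form index pvIdx is the position in pvPairs
lemma pvTail_idx (n : Int) : ∀ (fuel : Nat) (i0 : Int), (n - i0).toNat ≤ fuel → 0 ≤ i0 →
    ∀ (m : Nat) (hm : m < (((PySem.List.pyRange i0 n 1).flatMap
        (fun i => (PySem.List.pyRange (i+1) n 1).map (fun j => (i, j)))).length)),
    pvIdx n ((PySem.List.pyRange i0 n 1).flatMap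
        (fun i => (PySem.List.pyRange (i+1) n 1).map (fun j => (i, j))))[m].1
      ((PySem.List.pyRange i0 n 1).flatMap
        (fun i => (PySem.List.pyRange (i+1) n 1).map (fun j => (i, j))))[m].2
      = pvIdx n i0 (i0 + 1) + m := by
  intro fuel
  induction fuel with
  | zero =>
    intro i0 hf _ m hm
    have h0 : n ≤ i0 := by omega
    rw [show PySem.List.pyRange i0 n 1 = [] from by
      have := PySem.List.length_pyRange_one i0 n
      cases hpr : PySem.List.pyRange i0 n 1 with
      | nil => rfl
      | cons a l => rw [hpr] at this; simp at this; omega] at hm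
    simp at hm
  | succ fuel ih =>
    intro i0 hf h0 m hm
    by_cases hlt : i0 < n
    case neg =>
      rw [show PySem.List.pyRange i0 n 1 = [] from by
        have := PySem.List.length_pyRange_one i0 n
        cases hpr : PySem.List.pyRange i0 n 1 with
        | nil => rfl
        | cons a l => rw [hpr] at this; simp at this; omega] at hm
      simp at hm
    case pos =>
      have hcons := PySem.List.pyRange_one_cons hlt
      have hsplit : (PySem.List.pyRange i0 n 1).flatMap
          (fun i => (PySem.List.pyRange (i+1) n 1).map (fun j => (i, j)))
          = (PySem.List.pyRange (i0+1) n 1).map (fun j => (i0, j)) ++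
            (PySem.List.pyRange (i0+1) n 1).flatMap
              (fun i => (PySem.List.pyRange (i+1) n 1).map (fun j => (i, j))) := by
        rw [hcons]; simp [List.flatMap_cons]
      simp only [hsplit] at hm ⊢
      have hrowlen : ((PySem.List.pyRange (i0+1) n 1).map (fun j => (i0, j))).length
          = (n - i0 - 1).toNat := by
        rw [List.length_map, PySem.List.length_pyRange_one]; congr 1; ring
      by_cases hrow : m < (n - i0 - 1).toNat
      case pos =>
        rw [List.getElem_append_left (by omega)]
        have : ((PySem.List.pyRange (i0+1) n 1).map (fun j => (i0, j)))[m]'(by omega)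
            = (i0, (i0 + 1) + (m : Int)) := by
          rw [List.getElem_map, PySem.List.getElem_pyRange_one]
        rw [this]
        unfold pvIdx
        generalize PySem.Int.floordiv (i0 * (2 * n - i0 - 1)) 2 = F
        push_cast
        ring
      case neg =>
        rw [List.getElem_append_right (by omega)]
        have hm2 : m - ((PySem.List.pyRange (i0+1) n 1).map (fun j => (i0, j))).length
            < ((PySem.List.pyRange (i0+1) n 1).flatMap
                (fun i => (PySem.List.pyRange (i+1) n 1).map (fun j => (i, j)))).length := by
          rw [List.length_append] at hm; omega
        rw [ih (i0+1) (by omega) (by omega) _ hm2]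
        have hstep : pvIdx n (i0 + 1) (i0 + 1 + 1) = pvIdx n i0 (i0 + 1) + (n - i0 - 1) := by
          unfold pvIdx
          have hx : (i0 + 1) * (2 * n - (i0 + 1) - 1)
              = i0 * (2 * n - i0 - 1) + 2 * (n - i0 - 1) := by ring
          rw [hx, PySem.Int.floordiv_eq_ediv_of_pos (by norm_num),
            PySem.Int.floordiv_eq_ediv_of_pos (by norm_num)]
          generalize i0 * (2 * n - i0 - 1) = X
          omega
        rw [hstep, hrowlen]
        have : ((m - (n - i0 - 1).toNat : Nat) : Int) = (m : Int) - (n - i0 - 1) := by omega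
        rw [this]
        ring

lemma pvPairs_idx (n : Int) (m : Nat) (hm : m < (pvPairs n).length) :
    pvIdx n (pvPairs n)[m].1 (pvPairs n)[m].2 = (m : Int) := by
  have h := pvTail_idx n (n - 0).toNat 0 le_rfl le_rfl m hm
  rw [show pvIdx n 0 (0 + 1) = 0 from by
    unfold pvIdx
    rw [show (0 : Int) * (2 * n - 0 - 1) = 0 from by ring,
      PySem.Int.floordiv_eq_ediv_of_pos (by norm_num)]
    omega] at h
  simp only [show pvPairs n = (PySem.List.pyRange 0 n 1).flatMap
      (fun i => (PySem.List.pyRange (i+1) n 1).map (fun j => (i, j))) from rfl]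
  simpa using h

-- OR-fold: which bits are set
lemma orfold_testBit {α : Type} (xs : List α) (c : α → Bool) (d : α → Nat) (s t : Nat) :
    (xs.foldl (fun b x => if c x then b ||| (1 <<< d x) else b) s).testBit t
      = (s.testBit t || xs.any (fun x => c x && (d x == t))) := by
  induction xs generalizing s with
  | nil => simp
  | cons x xs ih =>
    simp only [List.foldl_cons, List.any_cons, ih]
    by_cases hc : c x
    · by_cases hd : d x = t
      · simp [hc, hd, Nat.testBit_or, Nat.one_shiftLeft]
      · have hb : (d x == t) = false := by simp [hd]
        simp [hc, hd, hb, Nat.testBit_or, Nat.one_shiftLeft]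
    · simp [hc]

-- scatter: the inverse array
lemma scatter_untouched (q : List Int) (base : List Int) (s : Int) (v : Int)
    (h0 : 0 ≤ v) (hv : v ∉ q) (hrange : ∀ x ∈ q, 0 ≤ x ∧ x.toNat < base.length) :
    PySem.List.pyGetD ((PySem.List.enumerate q s).foldl (fun l kv => PySem.List.pySetD l kv.2 kv.1) base) v 0
      = PySem.List.pyGetD base v 0 := by
  induction q generalizing base s with
  | nil => rfl
  | cons x q ih =>
    rw [PySem.List.enumerate_cons]
    simp only [List.foldl_cons]
    simp only [List.mem_cons, not_or] at hv
    have hx := hrange x (List.mem_cons_self ..)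
    rw [ih _ (s+1) hv.2 (fun y hy => by
      have := hrange y (List.mem_cons_of_mem _ hy)
      exact ⟨this.1, by rw [PySem.List.length_pySetD]; exact this.2⟩)]
    have hxx : x = ((x.toNat : Nat) : Int) := by omega
    have hvv : v = ((v.toNat : Nat) : Int) := by omega
    rw [hxx, hvv, PySem.List.pyGetD_pySetD_natCast _ _ _ _ _ hx.2,
      if_neg (by omega)]

lemma scatter_get (q : List Int) (base : List Int) (s : Int)
    (hnd : q.Nodup) (hrange : ∀ x ∈ q, 0 ≤ x ∧ x.toNat < base.length) :
    ∀ (k : Nat) (hk : k < q.length),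
      PySem.List.pyGetD ((PySem.List.enumerate q s).foldl (fun l kv => PySem.List.pySetD l kv.2 kv.1) base) q[k] 0
        = s + (k : Int) := by
  induction q generalizing base s with
  | nil => intro k hk; simp at hk
  | cons x q ih =>
    intro k hk
    rw [PySem.List.enumerate_cons]
    simp only [List.foldl_cons]
    simp only [List.nodup_cons] at hnd
    have hx := hrange x (List.mem_cons_self ..)
    have hlen : ∀ y ∈ q, 0 ≤ y ∧ y.toNat < (PySem.List.pySetD base x s).length := fun y hy => by
      have := hrange y (List.mem_cons_of_mem _ hy)
      exact ⟨this.1, by rw [PySem.List.length_pySetD]; exact this.2⟩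
    match k with
    | 0 =>
      simp only [List.getElem_cons_zero]
      rw [scatter_untouched q _ (s+1) x hx.1 hnd.1 hlen]
      have hxx : x = ((x.toNat : Nat) : Int) := by omega
      rw [hxx, PySem.List.pyGetD_pySetD_natCast _ _ _ _ _ hx.2, if_pos rfl]
      omega
    | k+1 =>
      simp only [List.getElem_cons_succ]
      rw [ih _ (s+1) hnd.2 hlen k (by simpa using hk)]
      push_cast; ring

lemma pvInv_get (n : Int) (p : List Int) (hp : p.Perm (PySem.List.pyRange 0 n 1))
    (k : Nat) (hk : k < p.length) :
    PySem.List.pyGetD (pvInv n p) p[k] 0 = (k : Int) := by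
  have hr : ∀ x ∈ p, 0 ≤ x ∧ x.toNat < (List.replicate n.toNat (0:Int)).length := by
    intro x hx
    have := PySem.List.mem_pyRange_one.mp (hp.mem_iff.mp hx)
    simp only [List.length_replicate]
    omega
  have := scatter_get p (List.replicate n.toNat 0) 0
    (hp.nodup_iff.mpr (PySem.List.nodup_pyRange_one 0 n)) hr k hk
  simpa [pvInv] using this

lemma scatter_length (L : List (Int × Int)) (base : List Int) :
    (L.foldl (fun l kv => PySem.List.pySetD l kv.2 kv.1) base).length = base.length := by
  induction L generalizing base with
  | nil => rfl
  | cons e L ih => simp only [List.foldl_cons]; rw [ih, PySem.List.length_pySetD]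

lemma pvInv_length (n : Int) (p : List Int) : (pvInv n p).length = n.toNat := by
  unfold pvInv; rw [scatter_length]; simp

lemma pvInv_perm (n : Int) (p : List Int) (hp : p.Perm (PySem.List.pyRange 0 n 1)) :
    (pvInv n p).Perm (PySem.List.pyRange 0 n 1) := by
  have hlenp : p.length = n.toNat := by
    rw [hp.length_eq, PySem.List.length_pyRange_one]; simp
  have hlenR : (PySem.List.pyRange 0 n 1).length = n.toNat := by
    rw [PySem.List.length_pyRange_one]; simp
  apply List.Perm.symm
  apply List.Subperm.perm_of_length_le
  · apply List.subperm_of_subset (PySem.List.nodup_pyRange_one 0 n)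
    intro x hx
    have hxb := PySem.List.mem_pyRange_one.mp hx
    have hk : x.toNat < p.length := by omega
    have hpk := (hp.mem_iff.mp (List.getElem_mem hk))
    have hpkb := PySem.List.mem_pyRange_one.mp hpk
    have hg := pvInv_get n p hp x.toNat hk
    have hL1 : (pvInv n p).length = n.toNat := pvInv_length n p
    rw [PySem.List.pyGetD_eq_getElem _ _ (by omega) (by omega)] at hg
    have hx' : ((x.toNat : Nat) : Int) = x := by omega
    rw [hx'] at hg
    rw [← hg]
    exact List.getElem_mem _
  · rw [pvInv_length, hlenR]

lemma pvInv_invol (n : Int) (p : List Int) (hp : p.Perm (PySem.List.pyRange 0 n 1)) :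
    pvInv n (pvInv n p) = p := by
  have hlenp : p.length = n.toNat := by
    rw [hp.length_eq, PySem.List.length_pyRange_one]; simp
  have hrp := pvInv_perm n p hp
  have hL1 : (pvInv n p).length = n.toNat := pvInv_length n p
  have hL2 : (pvInv n (pvInv n p)).length = n.toNat := pvInv_length n (pvInv n p)
  apply List.ext_getElem (by omega)
  intro m hm hm'
  have hpm := PySem.List.mem_pyRange_one.mp (hp.mem_iff.mp (List.getElem_mem hm'))
  have h1 := pvInv_get n p hp m hm'
  rw [PySem.List.pyGetD_eq_getElem _ _ (by omega) (by omega)] at h1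
  have h2 := pvInv_get n (pvInv n p) hrp (p[m]).toNat (by omega)
  rw [h1] at h2
  rw [PySem.List.pyGetD_eq_getElem _ _ (by omega) (by omega)] at h2
  simp only [Int.toNat_natCast] at h2
  rw [h2]; omega

-- the per-permutation core: A's branched forward mapping equals the inverse-lookup encoding
lemma pvAbits_eq (A : List (Int × Int × Int)) (n : Int) (p : List Int)
    (hp : p.Perm (PySem.List.pyRange 0 n 1)) :
    pvAbits A n p = pvQbits A n (pvInv n p) := by
  have hlenp : p.length = n.toNat := by
    rw [hp.length_eq, PySem.List.length_pyRange_one]; simp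
  have hmem : ∀ x, x ∈ p ↔ (0 ≤ x ∧ x < n) := fun x => by
    rw [hp.mem_iff, PySem.List.mem_pyRange_one]
  have hnd : p.Nodup := hp.nodup_iff.mpr (PySem.List.nodup_pyRange_one 0 n)
  have hA : pvAbits A n p
      = (PySem.List.enumerate (pvPairs n) 0).foldl
          (fun b e => if pvCA A p e then b ||| (1 <<< pvDA n p e) else b) 0 := by
    unfold pvAbits
    apply PySem.List.foldl_congr_mem
    intro acc e _
    by_cases h1 : PySem.List.pyGetD p e.2.1 0 < PySem.List.pyGetD p e.2.2 0
    · by_cases h2 : (pvLookup A e.2.2 e.2.1).getD 0 ≠ 0 <;> simp [pvCA, pvDA, h1, h2]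
    · by_cases h2 : (pvLookup A e.2.1 e.2.2).getD 0 ≠ 0 <;> simp [pvCA, pvDA, h1, h2]
  have hB : pvQbits A n (pvInv n p)
      = (PySem.List.enumerate (pvPairs n) 0).foldl
          (fun b e => if pvCB A n p e then b ||| (1 <<< e.1.toNat) else b) 0 := by
    unfold pvQbits
    apply PySem.List.foldl_congr_mem
    intro acc e _
    by_cases h : (pvLookup A (PySem.List.pyGetD (pvInv n p) e.2.2 0) (PySem.List.pyGetD (pvInv n p) e.2.1 0)).getD 0 ≠ 0 <;>
      simp [pvCB, h]
  rw [hA, hB]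
  apply Nat.eq_of_testBit_eq
  intro t
  rw [orfold_testBit, orfold_testBit]
  simp only [Nat.zero_testBit, Bool.false_or]
  rw [Bool.eq_iff_iff, List.any_eq_true, List.any_eq_true]
  have hPget : ∀ (m : Nat) (hm : m < (pvPairs n).length),
      ((pvPairIdx n).get? (pvPairs n)[m]).getD 0 = (m : Int) := by
    intro m hm; rw [pvPairIdx_get n m hm]; rfl
  have hInv : ∀ (m : Nat) (hm : m < p.length),
      PySem.List.pyGetD (pvInv n p) p[m] 0 = (m : Int) := pvInv_get n p hp
  constructor
  · rintro ⟨e, he, hcond⟩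
    obtain ⟨k, hk, rfl⟩ := (PySem.List.mem_enumerate_iff _ _ _).mp he
    rcases hPk : (pvPairs n)[k] with ⟨i, j⟩
    have hij : 0 ≤ i ∧ i < j ∧ j < n := mem_pvPairs.mp (hPk ▸ List.getElem_mem hk)
    have hi' : i.toNat < p.length := by omega
    have hj' : j.toNat < p.length := by omega
    have hpi : PySem.List.pyGetD p i 0 = p[i.toNat] :=
      PySem.List.pyGetD_eq_getElem p 0 (by omega) (by omega)
    have hpj : PySem.List.pyGetD p j 0 = p[j.toNat] :=
      PySem.List.pyGetD_eq_getElem p 0 (by omega) (by omega)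
    have hne : p[i.toNat] ≠ p[j.toNat] := fun hcontra =>
      absurd (hnd.getElem_inj_iff.mp hcontra) (by omega)
    have hbi := (hmem p[i.toNat]).mp (List.getElem_mem hi')
    have hbj := (hmem p[j.toNat]).mp (List.getElem_mem hj')
    simp only [hPk, pvCA, pvDA, hpi, hpj] at hcond
    by_cases hlt : p[i.toNat] < p[j.toNat]
    · rw [if_pos hlt, if_pos hlt] at hcond
      rw [Bool.and_eq_true] at hcond
      obtain ⟨hc1, hc2⟩ := hcond
      have hmemP : (p[i.toNat], p[j.toNat]) ∈ pvPairs n :=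
        mem_pvPairs.mpr ⟨hbi.1, hlt, hbj.2⟩
      obtain ⟨u, hu, hPu⟩ := List.getElem_of_mem hmemP
      have hgu : ((pvPairIdx n).get? (p[i.toNat], p[j.toNat])).getD 0 = (u : Int) := by
        rw [← hPu]; exact hPget u hu
      rw [hgu] at hc2
      have hut : u = t := by simpa using hc2
      refine ⟨(0 + (u : Int), (pvPairs n)[u]),
        (PySem.List.mem_enumerate_iff _ _ _).mpr ⟨u, hu, rfl⟩, ?_⟩
      have hia : PySem.List.pyGetD (pvInv n p) p[i.toNat] 0 = (i.toNat : Int) := hInv i.toNat hi'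
      have hib : PySem.List.pyGetD (pvInv n p) p[j.toNat] 0 = (j.toNat : Int) := hInv j.toNat hj'
      simp only [pvCB, hPu, hia, hib]
      have h1 : ((j.toNat : Int)) = j := by omega
      have h2 : ((i.toNat : Int)) = i := by omega
      rw [h1, h2]
      simp [hc1, hut]
    · rw [if_neg hlt, if_neg hlt] at hcond
      rw [Bool.and_eq_true] at hcond
      obtain ⟨hc1, hc2⟩ := hcond
      have hlt' : p[j.toNat] < p[i.toNat] := by
        rcases lt_or_eq_of_le (not_lt.mp hlt) with h | h
        · exact h
        · exact absurd h.symm hne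
      have hmemP : (p[j.toNat], p[i.toNat]) ∈ pvPairs n :=
        mem_pvPairs.mpr ⟨hbj.1, hlt', hbi.2⟩
      obtain ⟨u, hu, hPu⟩ := List.getElem_of_mem hmemP
      have hgu : ((pvPairIdx n).get? (p[j.toNat], p[i.toNat])).getD 0 = (u : Int) := by
        rw [← hPu]; exact hPget u hu
      rw [hgu] at hc2
      have hut : u = t := by simpa using hc2
      refine ⟨(0 + (u : Int), (pvPairs n)[u]),
        (PySem.List.mem_enumerate_iff _ _ _).mpr ⟨u, hu, rfl⟩, ?_⟩
      have hia : PySem.List.pyGetD (pvInv n p) p[i.toNat] 0 = (i.toNat : Int) := hInv i.toNat hi'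
      have hib : PySem.List.pyGetD (pvInv n p) p[j.toNat] 0 = (j.toNat : Int) := hInv j.toNat hj'
      simp only [pvCB, hPu, hia, hib]
      have h1 : ((j.toNat : Int)) = j := by omega
      have h2 : ((i.toNat : Int)) = i := by omega
      rw [h1, h2]
      simp [hc1, hut]
  · rintro ⟨e, he, hcond⟩
    obtain ⟨u, hu, rfl⟩ := (PySem.List.mem_enumerate_iff _ _ _).mp he
    rcases hPu : (pvPairs n)[u] with ⟨a, b⟩
    have hab : 0 ≤ a ∧ a < b ∧ b < n := mem_pvPairs.mp (hPu ▸ List.getElem_mem hu)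
    simp only [hPu, pvCB] at hcond
    rw [Bool.and_eq_true] at hcond
    obtain ⟨hc1, hc2⟩ := hcond
    have hut : u = t := by simpa using hc2
    obtain ⟨ka, hka, hpka⟩ := List.getElem_of_mem ((hmem a).mpr ⟨hab.1, by omega⟩)
    obtain ⟨kb, hkb, hpkb⟩ := List.getElem_of_mem ((hmem b).mpr ⟨by omega, hab.2.2⟩)
    have hinva : PySem.List.pyGetD (pvInv n p) a 0 = (ka : Int) := by
      rw [← hpka]; exact hInv ka hka
    have hinvb : PySem.List.pyGetD (pvInv n p) b 0 = (kb : Int) := by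
      rw [← hpkb]; exact hInv kb hkb
    rw [hinva, hinvb] at hc1
    have hkne : ka ≠ kb := by
      intro hcontra
      subst hcontra
      rw [hpka] at hpkb
      omega
    rcases Nat.lt_or_ge ka kb with hkk | hkk
    · have hmemP : ((ka : Int), (kb : Int)) ∈ pvPairs n :=
        mem_pvPairs.mpr ⟨by omega, by omega, by omega⟩
      obtain ⟨m, hm, hPm⟩ := List.getElem_of_mem hmemP
      refine ⟨(0 + (m : Int), (pvPairs n)[m]),
        (PySem.List.mem_enumerate_iff _ _ _).mpr ⟨m, hm, rfl⟩, ?_⟩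
      have hga : PySem.List.pyGetD p (ka : Int) 0 = a := by
        rw [PySem.List.pyGetD_eq_getElem p 0 (by omega) (by omega)]
        simpa using hpka
      have hgb : PySem.List.pyGetD p (kb : Int) 0 = b := by
        rw [PySem.List.pyGetD_eq_getElem p 0 (by omega) (by omega)]
        simpa using hpkb
      simp only [pvCA, pvDA, hPm, hga, hgb]
      rw [if_pos hab.2.1, if_pos hab.2.1]
      have hgu : ((pvPairIdx n).get? (a, b)).getD 0 = (u : Int) := by
        rw [← hPu]; exact hPget u hu
      rw [hgu]
      simp [hc1, hut]
    · have hkk' : kb < ka := Nat.lt_of_le_of_ne hkk (Ne.symm hkne)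
      have hmemP : ((kb : Int), (ka : Int)) ∈ pvPairs n :=
        mem_pvPairs.mpr ⟨by omega, by omega, by omega⟩
      obtain ⟨m, hm, hPm⟩ := List.getElem_of_mem hmemP
      refine ⟨(0 + (m : Int), (pvPairs n)[m]),
        (PySem.List.mem_enumerate_iff _ _ _).mpr ⟨m, hm, rfl⟩, ?_⟩
      have hga : PySem.List.pyGetD p (ka : Int) 0 = a := by
        rw [PySem.List.pyGetD_eq_getElem p 0 (by omega) (by omega)]
        simpa using hpka
      have hgb : PySem.List.pyGetD p (kb : Int) 0 = b := by
        rw [PySem.List.pyGetD_eq_getElem p 0 (by omega) (by omega)]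
        simpa using hpkb
      simp only [pvCA, pvDA, hPm, hga, hgb]
      rw [if_neg (by omega), if_neg (by omega)]
      have hgu : ((pvPairIdx n).get? (a, b)).getD 0 = (u : Int) := by
        rw [← hPu]; exact hPget u hu
      rw [hgu]
      simp [hc1, hut]

-- bits0 is the encoding at the inverse of the identity permutation
lemma pvBits0_eq (A : List (Int × Int × Int)) (n : Int) :
    pvBits0 A n = pvQbits A n (pvInv n (PySem.List.pyRange 0 n 1)) := by
  unfold pvBits0 pvQbits
  apply PySem.List.foldl_congr_mem
  intro acc e he
  obtain ⟨k, hk, rfl⟩ := (PySem.List.mem_enumerate_iff _ _ _).mp he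
  rcases hPk : (pvPairs n)[k] with ⟨a, b⟩
  have hab : 0 ≤ a ∧ a < b ∧ b < n := mem_pvPairs.mp (hPk ▸ List.getElem_mem hk)
  have hlen : (PySem.List.pyRange 0 n 1).length = n.toNat := by
    rw [PySem.List.length_pyRange_one]; simp
  have hRa : (PySem.List.pyRange 0 n 1)[a.toNat]'(by omega) = a := by
    rw [PySem.List.getElem_pyRange_one]; omega
  have hRb : (PySem.List.pyRange 0 n 1)[b.toNat]'(by omega) = b := by
    rw [PySem.List.getElem_pyRange_one]; omega
  have hia : PySem.List.pyGetD (pvInv n (PySem.List.pyRange 0 n 1)) a 0 = a := by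
    rw [← hRa, pvInv_get n _ (List.Perm.refl _) a.toNat (by omega)]
    rw [hRa]; omega
  have hib : PySem.List.pyGetD (pvInv n (PySem.List.pyRange 0 n 1)) b 0 = b := by
    rw [← hRb, pvInv_get n _ (List.Perm.refl _) b.toNat (by omega)]
    rw [hRb]; omega
  simp only [hia, hib]

-- permutations contains the input itself, and every permutation of it
lemma self_mem_permutations (xs : List Int) : xs ∈ PySem.List.permutations xs xs.length := by
  induction xs with
  | nil => simp [PySem.List.permutations_zero]
  | cons x rest ih =>
    show _ ∈ PySem.List.permutations (x :: rest) (rest.length + 1)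
    rw [PySem.List.permutations]
    apply List.mem_flatMap.mpr
    refine ⟨0, by simp, ?_⟩
    simp only [List.getElem?_cons_zero, List.eraseIdx_cons_zero]
    exact List.mem_map.mpr ⟨rest, ih, rfl⟩

lemma mem_permutations_of_perm : ∀ (q xs : List Int), q.Perm xs →
    q ∈ PySem.List.permutations xs xs.length := by
  intro q
  induction q with
  | nil =>
    intro xs hq
    rw [List.Perm.eq_nil hq.symm]
    simp [PySem.List.permutations_zero]
  | cons u q' ih =>
    intro xs hq
    obtain ⟨hu, hq'⟩ := List.cons_perm_iff_perm_erase.mp hq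
    have hilt : xs.idxOf u < xs.length := List.idxOf_lt_length_of_mem hu
    have hxi : xs[xs.idxOf u] = u := List.getElem_idxOf hilt
    have herase : xs.erase u = xs.eraseIdx (xs.idxOf u) := List.erase_eq_eraseIdx_of_idxOf rfl
    have hlen : xs.length = (xs.length - 1) + 1 := by omega
    rw [hlen, PySem.List.permutations]
    apply List.mem_flatMap.mpr
    refine ⟨xs.idxOf u, List.mem_range.mpr hilt, ?_⟩
    rw [List.getElem?_eq_getElem hilt, hxi]
    apply List.mem_map.mpr
    refine ⟨q', ?_, rfl⟩
    have hel : (xs.eraseIdx (xs.idxOf u)).length = xs.length - 1 := by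
      rw [List.length_eraseIdx]; simp [hilt]
    have := ih (xs.eraseIdx (xs.idxOf u)) (herase ▸ hq')
    rw [hel] at this
    exact this

lemma enum_as_range (xs : List Int) :
    PySem.List.enumerate xs 0
      = (List.range xs.length).map (fun (k : Nat) => ((k : Int), PySem.List.pyGetD xs (k : Int) 0)) := by
  apply List.ext_getElem (by simp [PySem.List.length_enumerate])
  intro k h1 h2
  rw [PySem.List.getElem_enumerate]
  have hk : k < xs.length := by simpa [PySem.List.length_enumerate] using h1
  simp [List.getElem_map, List.getElem_range, List.getElem?_eq_getElem hk]

-- the DFS of B is the fold over the permutations of the remaining vertices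
lemma pvPlace_eq (A : List (Int × Int × Int)) (n : Int) :
    ∀ (fuel : Nat) (remaining : List Int), remaining.length ≤ fuel →
    ∀ (assigned : List Int) (bits : Nat) (best : Option Nat),
    pvPlace A n fuel assigned remaining bits best
      = (PySem.List.permutations remaining remaining.length).foldl
          (fun b q => pvOptMin b (pvFinish A n assigned q bits)) best := by
  intro fuel
  induction fuel with
  | zero =>
    intro remaining hf assigned bits best
    cases remaining with
    | nil => cases best <;> simp [pvPlace, PySem.List.permutations_zero, pvFinish, pvOptMin]
    | cons x rs => simp at hf
  | succ f ihf =>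
    intro remaining hf assigned bits best
    cases remaining with
    | nil => cases best <;> simp [pvPlace, PySem.List.permutations_zero, pvFinish, pvOptMin]
    | cons x rs =>
      simp only [pvPlace]
      rw [show (x :: rs).length = rs.length + 1 from rfl, PySem.List.permutations,
        List.foldl_flatMap]
      rw [enum_as_range (x :: rs), List.foldl_map]
      apply PySem.List.foldl_congr_mem
      intro acc i hi
      have hilt : i < (x :: rs).length := List.mem_range.mp hi
      have hu : PySem.List.pyGetD (x :: rs) (i : Int) 0 = (x :: rs)[i] := by
        rw [PySem.List.pyGetD_natCast, List.getD_eq_getElem _ 0 hilt]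
      have hslice : PySem.List.slice (x :: rs) none (some (i : Int)) ++
          PySem.List.slice (x :: rs) (some ((i : Int) + 1)) none = (x :: rs).eraseIdx i := by
        rw [PySem.List.slice_to_natCast,
          show ((i : Int) + 1) = (((i + 1 : Nat)) : Int) from by push_cast; ring,
          PySem.List.slice_from_natCast, List.eraseIdx_eq_take_drop_succ]
      have hel : ((x :: rs).eraseIdx i).length = rs.length := by
        rw [List.length_eraseIdx, if_pos hilt]; simp
      have hxl : (x :: rs).length = rs.length + 1 := rfl
      simp only [hu, hslice]
      rw [List.getElem?_eq_getElem hilt, List.foldl_map]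
      have hih := ihf ((x :: rs).eraseIdx i) (by omega)  -- uses hel, hxl, hf
        (assigned ++ [(x :: rs)[i]]) (pvRow A n assigned bits (x :: rs)[i]) acc
      rw [hel] at hih
      rw [show (PySem.List.enumerate assigned 0).foldl
            (fun s aw =>
              if (pvLookup A (x :: rs)[i] aw.2).getD 0 ≠ 0
              then s ||| (1 <<< (pvIdx n aw.1 (assigned.length : Int)).toNat)
              else s) bits = pvRow A n assigned bits (x :: rs)[i] from rfl]
      rw [hih]
      apply PySem.List.foldl_congr_mem
      intro acc' q' _
      rw [show pvFinish A n assigned ((x :: rs)[i] :: q') bits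
          = pvFinish A n (assigned ++ [(x :: rs)[i]]) q' (pvRow A n assigned bits (x :: rs)[i]) from rfl]

-- the incremental bits of B flattened to one OR-fold over the completed pairs
lemma pvFinish_eq_orQ (A : List (Int × Int × Int)) (n : Int) :
    ∀ (q assigned : List Int) (bits : Nat),
    pvFinish A n assigned q bits
      = pvOrQ A n (assigned ++ q) (pvPairsFrom assigned.length (assigned.length + q.length)) bits := by
  intro q
  induction q with
  | nil => intro assigned bits; simp [pvFinish, pvOrQ, pvPairsFrom]
  | cons u q ih =>
    intro assigned bits
    rw [show pvFinish A n assigned (u :: q) bits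
        = pvFinish A n (assigned ++ [u]) q (pvRow A n assigned bits u) from rfl]
    rw [ih (assigned ++ [u]) (pvRow A n assigned bits u)]
    have hfull : (assigned ++ [u]) ++ q = assigned ++ (u :: q) := by simp
    have hlen1 : (assigned ++ [u]).length = assigned.length + 1 := by simp
    rw [hfull, hlen1]
    have hsplit : pvPairsFrom assigned.length (assigned.length + (u :: q).length)
        = ((List.range assigned.length).map (fun a => (a, assigned.length)))
          ++ pvPairsFrom (assigned.length + 1) (assigned.length + 1 + q.length) := by
      unfold pvPairsFrom
      rw [show assigned.length + (u :: q).length - assigned.length = q.length + 1 from by simp,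
        List.range'_succ,
        show assigned.length + 1 + q.length - (assigned.length + 1) = q.length from by omega]
      simp [List.flatMap_cons]
    rw [hsplit]
    unfold pvOrQ
    rw [List.foldl_append]
    congr 1
    rw [List.foldl_map]
    unfold pvRow
    rw [enum_as_range assigned, List.foldl_map]
    apply PySem.List.foldl_congr_mem
    intro acc a ha
    have halt : a < assigned.length := List.mem_range.mp ha
    have h1 : PySem.List.pyGetD (assigned ++ u :: q) ((assigned.length : Nat) : Int) 0 = u := by
      rw [PySem.List.pyGetD_natCast, List.getD_eq_getElem _ 0 (by simp),
        List.getElem_append_right (le_refl assigned.length)]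
      simp
    have h2 : PySem.List.pyGetD (assigned ++ u :: q) ((a : Nat) : Int) 0
        = PySem.List.pyGetD assigned (a : Int) 0 := by
      rw [PySem.List.pyGetD_natCast, PySem.List.pyGetD_natCast,
        List.getD_eq_getElem _ 0 (by simp; omega), List.getD_eq_getElem _ 0 halt,
        List.getElem_append_left halt]
    simp [pvCondQ, h1, h2, bne_iff_ne]

lemma pvFinish_eq_pvQbits (A : List (Int × Int × Int)) (n : Int) (q : List Int)
    (hq : q.Perm (PySem.List.pyRange 0 n 1)) :
    pvFinish A n [] q 0 = pvQbits A n q := by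
  have hlenq : q.length = n.toNat := by
    rw [hq.length_eq, PySem.List.length_pyRange_one]; simp
  rw [pvFinish_eq_orQ A n q []]
  simp only [List.nil_append, List.length_nil, Nat.zero_add]
  rw [hlenq]
  have hQ : pvQbits A n q
      = (PySem.List.enumerate (pvPairs n) 0).foldl
          (fun b e => if pvCondQ A q e.2.1 e.2.2 then b ||| (1 <<< e.1.toNat) else b) 0 := by
    unfold pvQbits
    apply PySem.List.foldl_congr_mem
    intro acc e _
    by_cases h : (pvLookup A (PySem.List.pyGetD q e.2.2 0) (PySem.List.pyGetD q e.2.1 0)).getD 0 ≠ 0 <;>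
      simp [pvCondQ, h]
  rw [hQ]
  apply Nat.eq_of_testBit_eq
  intro t
  unfold pvOrQ
  rw [orfold_testBit, orfold_testBit]
  simp only [Nat.zero_testBit, Bool.false_or]
  rw [Bool.eq_iff_iff, List.any_eq_true, List.any_eq_true]
  constructor
  · rintro ⟨p, hpmem, hcond⟩
    obtain ⟨k, hk, hp2⟩ := List.mem_flatMap.mp hpmem
    obtain ⟨a, ha, rfl⟩ := List.mem_map.mp hp2
    have hkb := List.mem_range'_1.mp hk
    have hab := List.mem_range.mp ha
    rw [Bool.and_eq_true] at hcond
    obtain ⟨hc1, hc2⟩ := hcond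
    have hmemP : ((a : Int), (k : Int)) ∈ pvPairs n :=
      mem_pvPairs.mpr ⟨by omega, by omega, by omega⟩
    obtain ⟨m, hm, hPm⟩ := List.getElem_of_mem hmemP
    have hidx : pvIdx n (a : Int) (k : Int) = (m : Int) := by
      have := pvPairs_idx n m hm
      rw [hPm] at this
      exact this
    rw [hidx] at hc2
    have hmt : m = t := by simpa using hc2
    refine ⟨(0 + (m : Int), (pvPairs n)[m]),
      (PySem.List.mem_enumerate_iff _ _ _).mpr ⟨m, hm, rfl⟩, ?_⟩
    rw [hPm]
    simp [hc1, hmt]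
  · rintro ⟨e, he, hcond⟩
    obtain ⟨m, hm, rfl⟩ := (PySem.List.mem_enumerate_iff _ _ _).mp he
    rcases hPm : (pvPairs n)[m] with ⟨X, Y⟩
    have hab : 0 ≤ X ∧ X < Y ∧ Y < n := mem_pvPairs.mp (hPm ▸ List.getElem_mem hm)
    simp only [hPm] at hcond
    rw [Bool.and_eq_true] at hcond
    obtain ⟨hc1, hc2⟩ := hcond
    have hmt : m = t := by simpa using hc2
    refine ⟨(X.toNat, Y.toNat), ?_, ?_⟩
    · apply List.mem_flatMap.mpr
      refine ⟨Y.toNat, List.mem_range'_1.mpr ⟨by omega, by omega⟩, ?_⟩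
      exact List.mem_map.mpr ⟨X.toNat, List.mem_range.mpr (by omega), rfl⟩
    · have hcX : ((X.toNat : Nat) : Int) = X := by omega
      have hcY : ((Y.toNat : Nat) : Int) = Y := by omega
      have hidx : pvIdx n X Y = (m : Int) := by
        have := pvPairs_idx n m hm
        rw [hPm] at this
        exact this
      simp only [hcX, hcY, hidx, hc1]
      simp [hmt]

-- min-fold lemmas
lemma foldl_min_le_init (l : List Nat) (a : Nat) : l.foldl min a ≤ a := by
  induction l generalizing a with
  | nil => simp
  | cons x xs ih => exact le_trans (ih _) (min_le_left _ _)

lemma foldl_min_le (l : List Nat) (a x : Nat) (h : x ∈ l) : l.foldl min a ≤ x := by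
  induction l generalizing a with
  | nil => simp at h
  | cons y ys ih =>
    simp only [List.foldl_cons]
    rcases List.mem_cons.mp h with rfl | h
    · exact le_trans (foldl_min_le_init _ _) (min_le_right _ _)
    · exact ih _ h

lemma foldl_min_mem (l : List Nat) (a : Nat) : l.foldl min a = a ∨ l.foldl min a ∈ l := by
  induction l generalizing a with
  | nil => left; rfl
  | cons x xs ih =>
    simp only [List.foldl_cons]
    rcases ih (min a x) with h | h
    · rcases Nat.le_total a x with hle | hle
      · left; rw [h, Nat.min_eq_left hle]
      · right; rw [h, Nat.min_eq_right hle]; exact List.mem_cons_self ..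
    · right; exact List.mem_cons_of_mem _ h

lemma foldl_min_head_le (f : List Int → Nat) (v : List Int) (vs : List (List Int))
    (q : List Int) (hq : q ∈ v :: vs) : (vs.map f).foldl min (f v) ≤ f q := by
  rcases List.mem_cons.mp hq with rfl | h
  · exact foldl_min_le_init _ _
  · exact foldl_min_le _ _ _ (List.mem_map_of_mem h)

lemma optfold_eq (qs : List (List Int)) (f : List Int → Nat) (m : Nat) :
    qs.foldl (fun b q => pvOptMin b (f q)) (some m) = some ((qs.map f).foldl min m) := by
  induction qs generalizing m with
  | nil => simp
  | cons q qs ih =>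
    simp only [List.foldl_cons, List.map_cons]
    show List.foldl _ (pvOptMin (some m) (f q)) qs = _
    show List.foldl _ (if f q < m then some (f q) else some m) qs = _
    rcases Nat.lt_or_ge (f q) m with h | h
    · rw [if_pos h, ih, Nat.min_eq_right (Nat.le_of_lt h)]
    · rw [if_neg (Nat.not_lt.mpr h), ih, Nat.min_eq_left h]

-- the two ports, written with the proof-local names
lemma portA_eq (A : List (Int × Int × Int)) (n : Int) :
    canonical_tournament A n
      = (((pvPerms n).foldl (fun m p => min m (pvAbits A n p)) (pvBits0 A n) : Nat) : Int) := rfl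

lemma portB_eq (A : List (Int × Int × Int)) (n : Int) :
    canonical_tournament_alt A n
      = (((pvPlace A n (PySem.List.pyRange 0 n 1).length [] (PySem.List.pyRange 0 n 1) 0 none).getD 0 : Nat) : Int) := rfl

-- ===== VERDICT (by name: the statement is the Claim_ definition above) =====
theorem canonical_tournament_spec : Claim_equal_canonical_tournament := by
  intro A n _ _
  unfold Spec_canonical_tournament
  rw [portA_eq, portB_eq]
  congr 1
  have hperm_of_mem : ∀ q ∈ pvPerms n, q.Perm (PySem.List.pyRange 0 n 1) := by
    intro q hq
    exact PySem.List.perm_of_mem_permutations hq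
  have hB : pvPlace A n (PySem.List.pyRange 0 n 1).length [] (PySem.List.pyRange 0 n 1) 0 none
      = (pvPerms n).foldl (fun b q => pvOptMin b (pvQbits A n q)) none := by
    rw [pvPlace_eq A n _ _ le_rfl]
    apply PySem.List.foldl_congr_mem
    intro acc q hq
    rw [pvFinish_eq_pvQbits A n q (hperm_of_mem q hq)]
  rw [hB]
  have hRmem : PySem.List.pyRange 0 n 1 ∈ pvPerms n := self_mem_permutations _
  rcases hq : pvPerms n with _ | ⟨v, vs⟩
  · rw [hq] at hRmem; simp at hRmem
  · rw [hq] at hRmem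
    rw [hq] at hperm_of_mem
    simp only [List.foldl_cons]
    show _ = ((List.foldl _ (pvOptMin none (pvQbits A n v)) vs).getD 0)
    show _ = ((List.foldl _ (some (pvQbits A n v)) vs).getD 0)
    rw [optfold_eq]
    simp only [Option.getD_some]
    -- A's side as a min over the mapped values
    have hA' : List.foldl (fun m p => min m (pvAbits A n p)) (min (pvBits0 A n) (pvAbits A n v)) vs
        = List.foldl min (pvBits0 A n) ((v :: vs).map (pvAbits A n)) := by
      rw [List.map_cons, List.foldl_cons, List.foldl_map]
    rw [hA']
    have hmemB : ∀ q ∈ v :: vs,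
        List.foldl min (pvQbits A n v) (vs.map (pvQbits A n)) ≤ pvQbits A n q :=
      fun q hq' => foldl_min_head_le _ _ _ _ hq'
    have key : ∀ q, q.Perm (PySem.List.pyRange 0 n 1) → pvAbits A n (pvInv n q) = pvQbits A n q := by
      intro q hqp
      rw [pvAbits_eq A n _ (pvInv_perm n q hqp), pvInv_invol n q hqp]
    apply Nat.le_antisymm
    · -- A's min ≤ B's min : B's min is pvQbits of some q in the list; its inverse is in the list too
      rcases foldl_min_mem (vs.map (pvQbits A n)) (pvQbits A n v) with h | h
      · rw [h]
        have hv := hperm_of_mem v (List.mem_cons_self ..)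
        have hp : pvInv n v ∈ v :: vs := by
          rw [← hq]; exact mem_permutations_of_perm _ _ (pvInv_perm n v hv)
        rw [← key v hv]
        exact foldl_min_le _ _ _ (List.mem_map_of_mem hp)
      · obtain ⟨q, hq', hval⟩ := List.mem_map.mp h
        have hqperm := hperm_of_mem q (List.mem_cons_of_mem _ hq')
        have hp : pvInv n q ∈ v :: vs := by
          rw [← hq]; exact mem_permutations_of_perm _ _ (pvInv_perm n q hqperm)
        rw [← hval, ← key q hqperm]
        exact foldl_min_le _ _ _ (List.mem_map_of_mem hp)
    · -- B's min ≤ A's min : A's min is bits0 or pvAbits of some p; both are pvQbits of members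
      rcases foldl_min_mem ((v :: vs).map (pvAbits A n)) (pvBits0 A n) with h | h
      · rw [h, pvBits0_eq]
        apply hmemB
        rw [← hq]
        exact mem_permutations_of_perm _ _ (pvInv_perm n _ (List.Perm.refl _))
      · obtain ⟨p, hp', hval⟩ := List.mem_map.mp h
        have hpperm := hperm_of_mem p hp'
        rw [← hval, pvAbits_eq A n p hpperm]
        apply hmemB
        rw [← hq]
        exact mem_permutations_of_perm _ _ (pvInv_perm n p hpperm)
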